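-- pv_equiv track=rewrite | github.com/kameelkhabaz/uchicago_classes | cmsc12100/short-exercises-kameelkhabaz/prev_final_probs/other_probs.py | gen_committee
-- ===== SOURCE A (Python) =====
-- def gen_committee(potential_members, diversity_dimension, target_per_group):
--     comm_assign = {}
--     num_in_grp = {}
--     for p in potential_members:
--         grp = p[diversity_dimension]
--         if num_in_grp.get(grp, 0) < target_per_group:
--             if grp in comm_assign:
--                 comm_assign[grp].append(p["Name"])
--             else:
--                 comm_assign[grp] = [p["Name"]]
--
--         num_in_grp[grp] = num_in_grp.get(grp, 0) + 1 #DONT FORGET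
--     return comm_assign
-- ===== SOURCE B (Python) =====
-- def gen_committee(potential_members, diversity_dimension, target_per_group):
--     # Pass 1: bucket the member records themselves by diversity value, in order.
--     groups = {}
--     for p in potential_members:
--         groups.setdefault(p[diversity_dimension], []).append(p)
--     # Pass 2: take names one at a time while under the cap; drop empty groups.
--     result = {}
--     for grp, members in groups.items():
--         kept = []
--         count = 0
--         for p in members:
--             if not (count < target_per_group):
--                 break
--             kept.append(p["Name"])
--             count += 1
--         if kept:
--             result[grp] = kept
--     return result
-- ===== Notes on version B (the rewrite author's own statement) =====
-- stated objective: alternative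
-- what changed: A interleaves per-group counting and capped insertion in one loop over two dicts; B first buckets the member records by diversity value, then a second pass walks each bucket taking names while a counter stays under the cap and drops empty results.
import Mathlib
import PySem

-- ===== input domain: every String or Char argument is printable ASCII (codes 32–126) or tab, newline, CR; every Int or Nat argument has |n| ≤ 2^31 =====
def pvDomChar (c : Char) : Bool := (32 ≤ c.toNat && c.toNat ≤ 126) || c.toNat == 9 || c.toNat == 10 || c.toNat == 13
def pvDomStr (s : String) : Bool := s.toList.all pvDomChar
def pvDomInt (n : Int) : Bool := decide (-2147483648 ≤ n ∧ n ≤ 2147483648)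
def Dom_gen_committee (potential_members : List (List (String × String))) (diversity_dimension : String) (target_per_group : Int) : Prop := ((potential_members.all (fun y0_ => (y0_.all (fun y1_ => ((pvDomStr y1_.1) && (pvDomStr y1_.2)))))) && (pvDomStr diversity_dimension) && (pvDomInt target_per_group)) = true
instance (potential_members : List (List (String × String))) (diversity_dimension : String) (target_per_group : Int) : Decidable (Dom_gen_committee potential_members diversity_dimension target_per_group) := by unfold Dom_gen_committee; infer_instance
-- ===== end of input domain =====

-- B re-decomposes A's single interleaved loop (two dicts, count-gated insertion) into two passes:
-- bucket the member records by diversity value, then cap each bucket with a counter; return values only.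

-- shared lookup helpers: p[k] for a Python dict p (first-match; "" is never reached under Pre_)
def pvKey (dd : String) (p : List (String × String)) : String := (PySem.Dict.mk p).getD dd ""
def pvName (p : List (String × String)) : String := (PySem.Dict.mk p).getD "Name" ""

-- ===== PORT A =====
-- the body of A's single for-loop over (comm_assign, num_in_grp)
def pvStepA (dd : String) (t : Int)
    (st : PySem.Dict String (List String) × PySem.Dict String Int)
    (p : List (String × String)) :
    PySem.Dict String (List String) × PySem.Dict String Int :=
  let grp := pvKey dd p
  let comm :=
    if st.2.getD grp 0 < t then
      (if st.1.contains grp then st.1.modify grp [] (fun l => l ++ [pvName p])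
       else st.1.insert grp [pvName p])
    else st.1
  (comm, st.2.modify grp 0 (fun c => c + 1))

def gen_committee (potential_members : List (List (String × String))) (diversity_dimension : String) (target_per_group : Int) : List (String × List String) :=
  (potential_members.foldl (pvStepA diversity_dimension target_per_group)
    (PySem.Dict.empty, PySem.Dict.empty)).1.items

-- ===== PORT B =====
-- B's inner capping loop: take p["Name"] while count < target, else break
def pvCapM (t : Int) (count : Int) : List (List (String × String)) → List String
  | [] => []
  | p :: rest => if count < t then pvName p :: pvCapM t (count + 1) rest else []

def gen_committee_alt (potential_members : List (List (String × String))) (diversity_dimension : String) (target_per_group : Int) : List (String × List String) :=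
  -- pass 1: bucket the member records by diversity value (setdefault-then-append = modify);
  -- pass 2: take names while under the cap (kept), dropping empty results
  ((potential_members.foldl
      (fun (d : PySem.Dict String (List (List (String × String)))) p =>
        d.modify (pvKey diversity_dimension p) [] (fun l => l ++ [p]))
      PySem.Dict.empty).items.foldl
    (fun (r : PySem.Dict String (List String)) gm =>
      if pvCapM target_per_group 0 gm.2 ≠ [] then r.insert gm.1 (pvCapM target_per_group 0 gm.2) else r)
    PySem.Dict.empty).items

-- ===== PRECONDITION & SPEC =====
-- Pre_ excludes exactly the inputs on which Python A raises KeyError: a member missing the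
-- diversity_dimension key, or a member within its group's cap missing the "Name" key
-- (B raises on exactly the same inputs; over-cap members missing "Name" stay inside Pre_).
def Pre_gen_committee (potential_members : List (List (String × String))) (diversity_dimension : String) (target_per_group : Int) : Prop :=
  (∀ p ∈ potential_members, (PySem.Dict.mk p).contains diversity_dimension = true) ∧
  ∀ i < potential_members.length,
    ((potential_members.take i).countP
        (fun q => pvKey diversity_dimension q == pvKey diversity_dimension potential_members[i]!) : Int)
      < target_per_group →
    (PySem.Dict.mk potential_members[i]!).contains "Name" = true
instance (potential_members : List (List (String × String))) (diversity_dimension : String) (target_per_group : Int) : Decidable (Pre_gen_committee potential_members diversity_dimension target_per_group) := by unfold Pre_gen_committee; infer_instance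

def pvWitness_gen_committee : (List (List (String × String))) × String × Int :=
  ([[("D", "g"), ("Name", "a")], [("D", "g"), ("Name", "b")], [("D", "h"), ("Name", "c")]], "D", 1)

def Spec_gen_committee (potential_members : List (List (String × String))) (diversity_dimension : String) (target_per_group : Int) (out : List (String × List String)) : Prop := out = gen_committee_alt potential_members diversity_dimension target_per_group
instance (potential_members : List (List (String × String))) (diversity_dimension : String) (target_per_group : Int) (out : List (String × List String)) : Decidable (Spec_gen_committee potential_members diversity_dimension target_per_group out) := by unfold Spec_gen_committee; infer_instance

-- ===== CLAIM (what is proved, stated in full; the proofs are below) =====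
def Claim_equal_gen_committee : Prop := ∀ (potential_members : List (List (String × String))) (diversity_dimension : String) (target_per_group : Int), Dom_gen_committee potential_members diversity_dimension target_per_group → Pre_gen_committee potential_members diversity_dimension target_per_group → Spec_gen_committee potential_members diversity_dimension target_per_group (gen_committee potential_members diversity_dimension target_per_group)

-- ===== LEMMAS AND PROOFS =====

-- the group-g members of a member list, in order, and their names
def pvGrp (dd : String) (pm : List (List (String × String))) (g : String) : List (List (String × String)) :=
  pm.filter (fun p => pvKey dd p == g)
def pvNms (dd : String) (pm : List (List (String × String))) (g : String) : List String :=
  (pvGrp dd pm g).map pvName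

theorem pvCapM_eq_take (t : Int) : ∀ (ms : List (List (String × String))) (c : Int),
    pvCapM t c ms = (ms.map pvName).take (t - c).toNat := by
  intro ms
  induction ms with
  | nil => intro c; simp [pvCapM]
  | cons p rest ih =>
    intro c
    by_cases h : c < t
    · have h1 : (t - c).toNat = (t - (c + 1)).toNat + 1 := by omega
      simp [pvCapM, h, h1, List.take_succ_cons, ih]
    · have h0 : (t - c).toNat = 0 := by omega
      simp [pvCapM, h, h0]

-- A's loop invariant (target ≥ 1)
theorem pvA_loop (dd : String) (t : Int) (ht : 1 ≤ t) :
    ∀ (pm done : List (List (String × String)))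
      (comm : PySem.Dict String (List String)) (num : PySem.Dict String Int),
      comm.keys = PySem.Set.ofList (done.map (pvKey dd)) →
      (∀ g, comm.getD g [] = (pvNms dd done g).take t.toNat) →
      (∀ g, num.getD g 0 = (done.countP (fun p => pvKey dd p == g) : Int)) →
      (pm.foldl (pvStepA dd t) (comm, num)).1.keys = PySem.Set.ofList ((done ++ pm).map (pvKey dd)) ∧
      (∀ g, (pm.foldl (pvStepA dd t) (comm, num)).1.getD g [] = (pvNms dd (done ++ pm) g).take t.toNat) := by
  intro pm
  induction pm with
  | nil =>
    intro done comm num hk hc hn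
    exact ⟨by simpa using hk, by simpa using hc⟩
  | cons p rest ih =>
    intro done comm num hk hc hn
    have hre : done ++ p :: rest = (done ++ [p]) ++ rest := by simp
    rw [List.foldl_cons, hre]
    -- the two components of A's step
    have hA1 : (pvStepA dd t (comm, num) p).1
        = (if num.getD (pvKey dd p) 0 < t then
            (if comm.contains (pvKey dd p) then comm.modify (pvKey dd p) [] (fun l => l ++ [pvName p])
             else comm.insert (pvKey dd p) [pvName p])
           else comm) := rfl
    have hA2 : (pvStepA dd t (comm, num) p).2 = num.modify (pvKey dd p) 0 (fun c => c + 1) := rfl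
    -- new count invariant (holds in every case)
    have hn' : ∀ g, (pvStepA dd t (comm, num) p).2.getD g 0
        = ((done ++ [p]).countP (fun q => pvKey dd q == g) : Int) := by
      intro g
      rw [hA2, PySem.Dict.getD_modify, List.countP_append]
      split_ifs with hg
      · subst hg; rw [hn]; simp
      · rw [hn]
        have : (pvKey dd p == g) = false := by simp [Ne.symm hg]
        simp [this]
    -- group-g names of done ++ [p]
    have hnms : ∀ g, pvNms dd (done ++ [p]) g
        = pvNms dd done g ++ (if pvKey dd p == g then [pvName p] else []) := by
      intro g
      simp only [pvNms, pvGrp, List.filter_append, List.map_append]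
      by_cases hg : pvKey dd p == g <;> simp [List.filter, hg]
    have hlen : ∀ g, (pvNms dd done g).length = done.countP (fun q => pvKey dd q == g) := by
      intro g; simp [pvNms, pvGrp, ← List.countP_eq_length_filter]
    by_cases hmem : pvKey dd p ∈ done.map (pvKey dd)
    · -- group already seen
      have hcont : comm.contains (pvKey dd p) = true := by
        rw [PySem.Dict.contains_iff_mem_keys, hk]
        simpa [PySem.Set.mem_ofList] using hmem
      have hkeys' : (pvStepA dd t (comm, num) p).1.keys
          = PySem.Set.ofList ((done ++ [p]).map (pvKey dd)) := by
        have hset : PySem.Set.ofList ((done ++ [p]).map (pvKey dd))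
            = PySem.Set.ofList (done.map (pvKey dd)) := by
          rw [List.map_append]
          simp only [List.map_cons, List.map_nil]
          rw [PySem.Set.ofList_append_singleton]
          exact PySem.Set.add_of_mem (by simpa [PySem.Set.mem_ofList] using hmem)
        rw [hA1, hset]
        split_ifs with hlt
        · rw [PySem.Dict.keys_modify, PySem.Dict.keys_insert_of_contains _ _ hcont, hk]
        · exact hk
      apply ih ((done ++ [p])) _ _ hkeys' _ hn'
      -- value invariant
      intro g
      by_cases hg : g = pvKey dd p
      · subst hg
        rw [hnms, if_pos (by simp)]
        by_cases hlt : num.getD (pvKey dd p) 0 < t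
        · have hcnat : done.countP (fun q => pvKey dd q == pvKey dd p) + 1 ≤ t.toNat := by
            have := hn (pvKey dd p); omega
          rw [hA1, if_pos hlt, if_pos hcont, PySem.Dict.getD_modify, if_pos rfl]
          rw [hc, List.take_of_length_le (by rw [hlen]; omega),
              List.take_of_length_le (by simp [hlen]; omega)]
        · have hclen : t.toNat ≤ (pvNms dd done (pvKey dd p)).length := by
            rw [hlen]; have := hn (pvKey dd p); omega
          rw [hA1, if_neg hlt, List.take_append_of_le_length hclen]
          exact hc (pvKey dd p)
      · rw [hnms, if_neg (by simpa using Ne.symm hg), List.append_nil, hA1]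
        split_ifs with h1
        · rw [PySem.Dict.getD_modify, if_neg hg]; exact hc g
        · exact hc g
    · -- first member of a new group
      have hcont : comm.contains (pvKey dd p) = false := by
        rw [Bool.eq_false_iff]
        intro hcc
        rw [PySem.Dict.contains_iff_mem_keys, hk] at hcc
        exact hmem (by simpa [PySem.Set.mem_ofList] using hcc)
      have hczero : done.countP (fun q => pvKey dd q == pvKey dd p) = 0 := by
        apply List.countP_eq_zero.mpr
        intro q hq hqe
        exact hmem (List.mem_map.mpr ⟨q, hq, by simpa using hqe⟩)
      have hnil : pvNms dd done (pvKey dd p) = [] := by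
        have := hlen (pvKey dd p); rw [hczero] at this
        exact List.eq_nil_of_length_eq_zero this
      have hlt : num.getD (pvKey dd p) 0 < t := by rw [hn, hczero]; omega
      have hstep1 : (pvStepA dd t (comm, num) p).1 = comm.insert (pvKey dd p) [pvName p] := by
        rw [hA1, if_pos hlt, if_neg (by simp [hcont])]
      have hkeys' : (pvStepA dd t (comm, num) p).1.keys
          = PySem.Set.ofList ((done ++ [p]).map (pvKey dd)) := by
        rw [hstep1, PySem.Dict.keys_insert_of_not_contains _ _ hcont, hk, List.map_append]
        simp only [List.map_cons, List.map_nil]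
        rw [PySem.Set.ofList_append_singleton,
            PySem.Set.add_of_not_mem (by simpa [PySem.Set.mem_ofList] using hmem)]
      apply ih ((done ++ [p])) _ _ hkeys' _ hn'
      intro g
      by_cases hg : g = pvKey dd p
      · subst hg
        rw [hnms, if_pos (by simp), hnil, List.nil_append, hstep1,
            PySem.Dict.getD_insert, if_pos rfl,
            List.take_of_length_le (by simp; omega)]
      · rw [hnms, if_neg (by simpa using Ne.symm hg), List.append_nil, hstep1,
            PySem.Dict.getD_insert, if_neg hg]
        exact hc g

-- A's loop leaves comm_assign empty when target ≤ 0
theorem pvA_loop_nonpos (dd : String) (t : Int) (ht : t ≤ 0) :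
    ∀ (pm : List (List (String × String)))
      (comm : PySem.Dict String (List String)) (num : PySem.Dict String Int),
      (∀ g, 0 ≤ num.getD g 0) →
      (pm.foldl (pvStepA dd t) (comm, num)).1 = comm := by
  intro pm
  induction pm with
  | nil => intro comm num _; rfl
  | cons p rest ih =>
    intro comm num hnum
    have hcond : ¬ (num.getD (pvKey dd p) 0 < t) := by
      have := hnum (pvKey dd p); omega
    have hstep : pvStepA dd t (comm, num) p
        = (comm, num.modify (pvKey dd p) 0 (fun c => c + 1)) := by
      simp [pvStepA, hcond]
    rw [List.foldl_cons, hstep]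
    apply ih
    intro g
    rw [PySem.Dict.getD_modify]
    split_ifs with hg
    · have := hnum (pvKey dd p); subst hg; omega
    · exact hnum g

-- B's pass-1 dict: keys and per-group values
theorem pvGroups_keys (pm : List (List (String × String))) (dd : String) :
    (pm.foldl (fun (d : PySem.Dict String (List (List (String × String)))) p =>
        d.modify (pvKey dd p) [] (fun l => l ++ [p])) PySem.Dict.empty).keys
      = PySem.Set.ofList (pm.map (pvKey dd)) := by
  rw [PySem.Dict.keys_foldl_modify_key pm (pvKey dd) [] (fun _ p => fun l => l ++ [p])]
  simp [PySem.Set.update_nil_left]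

theorem pvGroups_getD (pm : List (List (String × String))) (dd : String) (g : String) :
    (pm.foldl (fun (d : PySem.Dict String (List (List (String × String)))) p =>
        d.modify (pvKey dd p) [] (fun l => l ++ [p])) PySem.Dict.empty).getD g []
      = pvGrp dd pm g := by
  rw [← List.foldl_map (f := fun p => (pvKey dd p, p))
        (g := fun (d : PySem.Dict String (List (List (String × String)))) q => d.modify q.1 [] (fun l => l ++ [q.2])),
      PySem.Dict.getD_foldl_modify_append]
  simp [pvGrp, List.filter_map, Function.comp_def]

theorem pvGroups_items (pm : List (List (String × String))) (dd : String) :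
    (pm.foldl (fun (d : PySem.Dict String (List (List (String × String)))) p =>
        d.modify (pvKey dd p) [] (fun l => l ++ [p])) PySem.Dict.empty).items
      = (PySem.Set.ofList (pm.map (pvKey dd))).map (fun g => (g, pvGrp dd pm g)) := by
  have hnd : (pm.foldl (fun (d : PySem.Dict String (List (List (String × String)))) p =>
      d.modify (pvKey dd p) [] (fun l => l ++ [p])) PySem.Dict.empty).keys.Nodup := by
    rw [pvGroups_keys]; exact PySem.Set.nodup_ofList _
  rw [PySem.Dict.items_eq_map_keys _ hnd [], pvGroups_keys]
  exact List.map_congr_left (fun g _ => by rw [pvGroups_getD])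

theorem pvGrp_ne_nil (pm : List (List (String × String))) (dd : String) (g : String)
    (h : g ∈ pm.map (pvKey dd)) : pvGrp dd pm g ≠ [] := by
  rcases List.mem_map.mp h with ⟨q, hq, rfl⟩
  exact List.ne_nil_of_mem (List.mem_filter.mpr ⟨hq, by simp⟩)

theorem gen_committee_eq (pm : List (List (String × String))) (dd : String) (t : Int) :
    gen_committee pm dd t = gen_committee_alt pm dd t := by
  by_cases ht : 1 ≤ t
  · -- target ≥ 1: both sides are the grouped names, capped at t, keyed in first-occurrence order
    have hloop := pvA_loop dd t ht pm [] PySem.Dict.empty PySem.Dict.empty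
      (by simp) (by intro g; simp [pvNms, pvGrp]) (by intro g; simp)
    rw [List.nil_append] at hloop
    obtain ⟨hk, hv⟩ := hloop
    have hA : gen_committee pm dd t
        = (PySem.Set.ofList (pm.map (pvKey dd))).map (fun g => (g, (pvNms dd pm g).take t.toNat)) := by
      unfold gen_committee
      have hnd : (pm.foldl (pvStepA dd t) (PySem.Dict.empty, PySem.Dict.empty)).1.keys.Nodup := by
        rw [hk]; exact PySem.Set.nodup_ofList _
      rw [PySem.Dict.items_eq_map_keys _ hnd [], hk]
      exact List.map_congr_left (fun g _ => by rw [hv])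
    have hB : gen_committee_alt pm dd t
        = (PySem.Set.ofList (pm.map (pvKey dd))).map (fun g => (g, (pvNms dd pm g).take t.toNat)) := by
      unfold gen_committee_alt
      rw [pvGroups_items]
      have hne : ∀ gm ∈ (PySem.Set.ofList (pm.map (pvKey dd))).map (fun g => (g, pvGrp dd pm g)),
          ∀ (r : PySem.Dict String (List String)),
          (if pvCapM t 0 gm.2 ≠ [] then r.insert gm.1 (pvCapM t 0 gm.2) else r)
            = r.insert gm.1 (pvCapM t 0 gm.2) := by
        intro gm hgm r
        rcases List.mem_map.mp hgm with ⟨g, hg, rfl⟩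
        have hnn : pvGrp dd pm g ≠ [] :=
          pvGrp_ne_nil pm dd g (by simpa [PySem.Set.mem_ofList] using hg)
        have : pvCapM t 0 (pvGrp dd pm g) ≠ [] := by
          rw [pvCapM_eq_take]
          simp only [sub_zero]
          simp [List.take_eq_nil_iff, hnn]
          omega
        simp [this]
      rw [PySem.List.foldl_congr_mem' _ _ _ _ hne]
      refine Eq.trans
        (PySem.Dict.items_foldl_insert_fresh
          ((PySem.Set.ofList (pm.map (pvKey dd))).map (fun g => (g, pvGrp dd pm g)))
          (fun (gm : String × List (List (String × String))) => gm.1)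
          (fun (gm : String × List (List (String × String))) => pvCapM t 0 gm.2)
          PySem.Dict.empty (by intro a _; simp)
          (by rw [List.map_map]
              have hcomp : ((fun (gm : String × List (List (String × String))) => gm.1) ∘ fun g => (g, pvGrp dd pm g)) = id := rfl
              rw [hcomp, List.map_id]
              exact PySem.Set.nodup_ofList _)) ?_
      simp only [PySem.Dict.empty, List.nil_append, List.map_map]
      exact List.map_congr_left (fun g _ => by
        simp [pvCapM_eq_take, pvNms])
    rw [hA, hB]
  · -- target ≤ 0: both sides are empty
    have hA : gen_committee pm dd t = [] := by
      unfold gen_committee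
      rw [pvA_loop_nonpos dd t (by omega) pm PySem.Dict.empty PySem.Dict.empty (by intro g; simp)]
      rfl
    have hB : gen_committee_alt pm dd t = [] := by
      unfold gen_committee_alt
      have hid : ∀ gm ∈ (pm.foldl (fun (d : PySem.Dict String (List (List (String × String)))) p =>
            d.modify (pvKey dd p) [] (fun l => l ++ [p])) PySem.Dict.empty).items,
          ∀ (r : PySem.Dict String (List String)),
          (if pvCapM t 0 gm.2 ≠ [] then r.insert gm.1 (pvCapM t 0 gm.2) else r) = r := by
        intro gm _ r
        have h0 : (t - 0).toNat = 0 := by omega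
        have hcap : pvCapM t 0 gm.2 = [] := by
          rw [pvCapM_eq_take, h0, List.take_zero]
        simp [hcap]
      rw [PySem.List.foldl_congr_mem' _ _ _ _ hid, PySem.List.foldl_ignore]
      rfl
    rw [hA, hB]

-- ===== VERDICT (by name: the statement is the Claim_ definition above) =====
theorem gen_committee_spec : Claim_equal_gen_committee := by
  intro pm dd t _ _
  unfold Spec_gen_committee
  exact gen_committee_eq pm dd t
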